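-- pv_equiv track=rewrite | github.com/ardyskl/algorithms | 2sat.py | reduce_size
-- ===== SOURCE A (Python) =====
-- def reduce_size(clauses):
--     """ reduce the size of clauses
--         If one variable only appears as either positive or negative, this clause can be removed as we can easily
--         satisfy this clause by setting this variable always true or false.
--         Iteratively remove these clauses to reduce the problem size
--     """
--     pos = {clause[0] for clause in clauses if clause[0] > 0} | {clause[1] for clause in clauses if clause[1] > 0}
--     neg = {-clause[0] for clause in clauses if clause[0] < 0} | {-clause[1] for clause in clauses if clause[1] < 0}
--     # use symmetic difference b/w two sets to determine the singular variables
--     diff = pos.symmetric_difference(neg)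
--     while len(diff):
--         i = 0
--         while i < len(clauses):
--             if abs(clauses[i][0]) in diff or abs(clauses[i][1]) in diff:
--                 clauses.pop(i)
--             i += 1
--         pos = {clause[0] for clause in clauses if clause[0] > 0} | {clause[1] for clause in clauses if clause[1] > 0}
--         neg = {-clause[0] for clause in clauses if clause[0] < 0} | {-clause[1] for clause in clauses if clause[1] < 0}
--         diff = pos.symmetric_difference(neg)
--     return clauses
-- ===== SOURCE B (Python) =====
-- def reduce_size(clauses):
--     """Same reduction, computed as a fixpoint of whole-list filtering:
--     each round finds the variables occurring with a single polarity via one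
--     polarity-flag dict, then drops every clause touching one of them."""
--     kept = clauses
--     while True:
--         pol = {}
--         for l in [l for c in kept for l in (c[0], c[1]) if l]:
--             v = abs(l)
--             p, n = pol.get(v, (False, False))
--             pol[v] = (p or l > 0, n or l < 0)
--         bad = {v for v, (p, n) in pol.items() if p != n}
--         if not bad:
--             break
--         kept = [c for c in kept if abs(c[0]) not in bad and abs(c[1]) not in bad]
--     clauses[:] = kept
--     return clauses
-- ===== Notes on version B (the rewrite author's own statement) =====
-- stated objective: alternative
-- what changed: Replaces A's in-place index scan with pop (which skips the element after each removal, so removals of one round can spill into later rounds) and its four set comprehensions plus symmetric_difference by a pure fixpoint loop: each round builds one polarity-flag dict over the live literals, derives the single-polarity variables from it, and rebuilds the clause list with a single filter; equality holds because both compute the unique maximal sublist in which every variable occurs in both polarities.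
import Mathlib
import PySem

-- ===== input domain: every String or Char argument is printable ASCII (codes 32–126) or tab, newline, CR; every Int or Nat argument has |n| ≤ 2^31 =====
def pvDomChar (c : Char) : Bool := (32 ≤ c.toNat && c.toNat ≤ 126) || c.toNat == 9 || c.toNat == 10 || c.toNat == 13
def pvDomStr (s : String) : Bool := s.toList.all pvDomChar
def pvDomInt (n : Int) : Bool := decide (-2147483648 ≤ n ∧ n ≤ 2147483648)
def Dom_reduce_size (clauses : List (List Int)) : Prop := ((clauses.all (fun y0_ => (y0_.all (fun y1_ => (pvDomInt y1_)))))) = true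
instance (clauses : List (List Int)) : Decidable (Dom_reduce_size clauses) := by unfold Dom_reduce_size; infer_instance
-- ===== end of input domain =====

-- B replaces A's in-place pop/index scan and set-comprehension rounds by a pure filter fixpoint with a
-- polarity-flag dict per round ("alternative" objective); equality of the RETURN value is proved (both
-- Pythons also leave `clauses` holding that same final list).


-- ===== PORT A =====
-- clause[0] / clause[1]; exact under Pre_ (every clause has length ≥ 2, so the index is in range)
def pvL0 (c : List Int) : Int := PySem.List.pyGetD c 0 0
def pvL1 (c : List Int) : Int := PySem.List.pyGetD c 1 0

-- {clause[0] for clause in cs if clause[0] > 0} | {clause[1] for clause in cs if clause[1] > 0}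
def pvPosOf (cs : List (List Int)) : PySem.Set Int :=
  PySem.Set.union (PySem.Set.ofList ((cs.filter (fun c => decide (0 < pvL0 c))).map pvL0))
                  (PySem.Set.ofList ((cs.filter (fun c => decide (0 < pvL1 c))).map pvL1))

-- {-clause[0] for clause in cs if clause[0] < 0} | {-clause[1] for clause in cs if clause[1] < 0}
def pvNegOf (cs : List (List Int)) : PySem.Set Int :=
  PySem.Set.union (PySem.Set.ofList ((cs.filter (fun c => decide (pvL0 c < 0))).map (fun c => -pvL0 c)))
                  (PySem.Set.ofList ((cs.filter (fun c => decide (pvL1 c < 0))).map (fun c => -pvL1 c)))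

def pvDiffOf (cs : List (List Int)) : PySem.Set Int := PySem.Set.symmDiff (pvPosOf cs) (pvNegOf cs)

-- abs(clauses[i][0]) in diff or abs(clauses[i][1]) in diff
def pvDoomedA (diff : PySem.Set Int) (c : List Int) : Bool :=
  PySem.Set.contains diff |pvL0 c| || PySem.Set.contains diff |pvL1 c|

-- the inner `while i < len(clauses)` scan: pop(i) then i += 1 skips the element sliding into slot i
def pvPassA (diff : PySem.Set Int) : List (List Int) → List (List Int)
  | [] => []
  | c :: rest =>
    if pvDoomedA diff c then
      match rest with
      | [] => []
      | d :: rest' => d :: pvPassA diff rest'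
    else c :: pvPassA diff rest

theorem pvPassA_nil (diff : PySem.Set Int) : pvPassA diff [] = [] := by
  conv_lhs => rw [pvPassA.eq_def]

theorem pvPassA_cons (diff : PySem.Set Int) (c : List Int) (rest : List (List Int)) :
    pvPassA diff (c :: rest) =
      if pvDoomedA diff c then (match rest with | [] => [] | d :: rest' => d :: pvPassA diff rest')
      else c :: pvPassA diff rest := by
  conv_lhs => rw [pvPassA.eq_def]

theorem pvPassA_length_le (diff : PySem.Set Int) (cs : List (List Int)) :
    (pvPassA diff cs).length ≤ cs.length := by
  induction cs using pvPassA.induct diff with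
  | case1 => simp [pvPassA_nil]
  | case2 c hd => simp [pvPassA_cons, hd]
  | case3 c hd d rest' ih => simp [pvPassA_cons, hd]; omega
  | case4 c rest hd ih => simp [pvPassA_cons, hd]; omega

theorem pvPassA_length_lt (diff : PySem.Set Int) (cs : List (List Int))
    (h : ∃ c ∈ cs, pvDoomedA diff c = true) : (pvPassA diff cs).length < cs.length := by
  induction cs using pvPassA.induct diff with
  | case1 => simp at h
  | case2 c hd => simp [pvPassA_cons, hd]
  | case3 c hd d rest' ih =>
    have := pvPassA_length_le diff rest'
    simp [pvPassA_cons, hd]; omega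
  | case4 c rest hd ih =>
    obtain ⟨e, he, hde⟩ := h
    rcases List.mem_cons.mp he with rfl | he'
    · exact absurd hde hd
    · have := ih ⟨e, he', hde⟩
      simp [pvPassA_cons, hd]; omega

theorem pvDiffOf_nonempty_exists (cs : List (List Int)) (h : pvDiffOf cs ≠ []) :
    ∃ c ∈ cs, pvDoomedA (pvDiffOf cs) c = true := by
  obtain ⟨v, hv⟩ := List.exists_mem_of_ne_nil _ h
  have hv' := hv
  rw [pvDiffOf, PySem.Set.mem_symmDiff] at hv'
  have hpn : v ∈ pvPosOf cs ∨ v ∈ pvNegOf cs := by tauto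
  have : ∃ c ∈ cs, |pvL0 c| = v ∨ |pvL1 c| = v := by
    rcases hpn with hp | hn
    · simp only [pvPosOf, PySem.Set.mem_union, PySem.Set.mem_ofList, List.mem_map,
        List.mem_filter, decide_eq_true_eq] at hp
      rcases hp with ⟨c, ⟨hc, hpos⟩, rfl⟩ | ⟨c, ⟨hc, hpos⟩, rfl⟩
      · exact ⟨c, hc, Or.inl (abs_of_pos hpos)⟩
      · exact ⟨c, hc, Or.inr (abs_of_pos hpos)⟩
    · simp only [pvNegOf, PySem.Set.mem_union, PySem.Set.mem_ofList, List.mem_map,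
        List.mem_filter, decide_eq_true_eq] at hn
      rcases hn with ⟨c, ⟨hc, hneg⟩, rfl⟩ | ⟨c, ⟨hc, hneg⟩, rfl⟩
      · exact ⟨c, hc, Or.inl (abs_of_neg hneg)⟩
      · exact ⟨c, hc, Or.inr (abs_of_neg hneg)⟩
  obtain ⟨c, hc, habs⟩ := this
  refine ⟨c, hc, ?_⟩
  rcases habs with h0 | h1
  · simp [pvDoomedA]; left; exact h0 ▸ hv
  · simp [pvDoomedA]; right; exact h1 ▸ hv

-- the outer `while len(diff)` loop (pos/neg/diff are recomputed from the shrunken list each round)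
def pvLoopA (cs : List (List Int)) : List (List Int) :=
  if PySem.Set.len (pvDiffOf cs) = 0 then cs
  else pvLoopA (pvPassA (pvDiffOf cs) cs)
termination_by cs.length
decreasing_by
  exact pvPassA_length_lt _ _ (pvDiffOf_nonempty_exists cs (by
    intro hnil; simp [PySem.Set.len, hnil] at *))

def reduce_size (clauses : List (List Int)) : List (List Int) := pvLoopA clauses

-- ===== PORT B =====
-- [l for c in kept for l in (c[0], c[1]) if l]
def pvLits (cs : List (List Int)) : List Int :=
  (cs.flatMap (fun c => [pvL0 c, pvL1 c])).filter (fun l => decide (l ≠ 0))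

-- the `for l in …: p, n = pol.get(abs(l), (False, False)); pol[abs(l)] = (p or l > 0, n or l < 0)` loop
def pvPolFold (L : List Int) : PySem.Dict Int (Bool × Bool) :=
  L.foldl (fun pol l =>
    pol.insert |l| ((pol.getD |l| (false, false)).1 || decide (0 < l),
                    (pol.getD |l| (false, false)).2 || decide (l < 0))) PySem.Dict.empty

def pvPolOf (cs : List (List Int)) : PySem.Dict Int (Bool × Bool) := pvPolFold (pvLits cs)

-- {v for v, (p, n) in pol.items() if p != n}
def pvBadOf (cs : List (List Int)) : PySem.Set Int :=
  PySem.Set.ofList ((((pvPolOf cs).items.filter (fun p => p.2.1 != p.2.2)).map (fun p => p.1)))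

-- abs(c[0]) not in bad and abs(c[1]) not in bad
def pvKeep (bad : PySem.Set Int) (c : List Int) : Bool :=
  !PySem.Set.contains bad |pvL0 c| && !PySem.Set.contains bad |pvL1 c|

theorem pvPolFold_keys (L : List Int) : (pvPolFold L).keys = PySem.Set.ofList (L.map (fun l => |l|)) := by
  rw [pvPolFold, PySem.Dict.keys_foldl_insert_key (key := fun l => |l|)
    (f := fun pol l => ((pol.getD |l| (false, false)).1 || decide (0 < l),
                        (pol.getD |l| (false, false)).2 || decide (l < 0)))]
  rw [PySem.Dict.keys_empty, PySem.Set.update_nil_left]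

theorem pvBadOf_nonempty_exists (cs : List (List Int)) (h : pvBadOf cs ≠ []) :
    ∃ c ∈ cs, pvKeep (pvBadOf cs) c = false := by
  obtain ⟨v, hv⟩ := List.exists_mem_of_ne_nil _ h
  have hvk : v ∈ (pvPolOf cs).keys := by
    have := hv
    simp only [pvBadOf, PySem.Set.mem_ofList, List.mem_map, List.mem_filter] at this
    obtain ⟨p, ⟨hp, _⟩, rfl⟩ := this
    simp only [PySem.Dict.keys]
    exact List.mem_map.mpr ⟨p, hp, rfl⟩
  rw [pvPolOf, pvPolFold_keys] at hvk
  rw [PySem.Set.mem_ofList, List.mem_map] at hvk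
  obtain ⟨l, hl, habs⟩ := hvk
  simp only [pvLits, List.mem_filter, List.mem_flatMap, List.mem_cons, List.mem_singleton,
    decide_eq_true_eq] at hl
  obtain ⟨⟨c, hc, hlit⟩, _⟩ := hl
  refine ⟨c, hc, ?_⟩
  simp only [pvKeep, Bool.and_eq_false_iff]
  rcases hlit with h0 | h1 | hF
  · exact Or.inl (by simp only [Bool.not_eq_false']; rw [PySem.Set.contains_iff, ← h0, habs]; exact hv)
  · exact Or.inr (by simp only [Bool.not_eq_false']; rw [PySem.Set.contains_iff, ← h1, habs]; exact hv)
  · exact absurd hF (List.not_mem_nil)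

-- the `while True: … if not bad: break; kept = [c for c in kept if …]` loop
def pvLoopB (cs : List (List Int)) : List (List Int) :=
  if pvBadOf cs = [] then cs
  else pvLoopB (cs.filter (pvKeep (pvBadOf cs)))
termination_by cs.length
decreasing_by
  rename_i h
  obtain ⟨c, hc, hk⟩ := pvBadOf_nonempty_exists cs (by assumption)
  simp only [List.filter_attach, List.length_unattach, List.length_attach, List.length_map]
  exact List.length_filter_lt_length_iff_exists.mpr ⟨c, hc, by simpa using hk⟩

def reduce_size_alt (clauses : List (List Int)) : List (List Int) := pvLoopB clauses

-- ===== PRECONDITION & SPEC =====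
-- Pre_ excludes exactly the inputs where the Python A raises IndexError (a clause shorter than 2,
-- dereferenced as clause[0]/clause[1]); B raises there too.
def Pre_reduce_size (clauses : List (List Int)) : Prop := ∀ c ∈ clauses, 2 ≤ c.length
instance (clauses : List (List Int)) : Decidable (Pre_reduce_size clauses) := by
  unfold Pre_reduce_size; infer_instance

def pvWitness_reduce_size : List (List Int) := [[1, -2], [-1, 2]]

def Spec_reduce_size (clauses : List (List Int)) (out : List (List Int)) : Prop := out = reduce_size_alt clauses
instance (clauses : List (List Int)) (out : List (List Int)) : Decidable (Spec_reduce_size clauses out) := by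
  unfold Spec_reduce_size; infer_instance

-- ===== CLAIM (what is proved, stated in full; the proofs are below) =====
def Claim_equal_reduce_size : Prop := ∀ (clauses : List (List Int)), Dom_reduce_size clauses → Pre_reduce_size clauses → Spec_reduce_size clauses (reduce_size clauses)

-- ===== LEMMAS AND PROOFS =====

-- semantic layer: occurrence of a variable with a polarity, singular variables, doomed clauses
def SHasPos (cs : List (List Int)) (v : Int) : Prop := 0 < v ∧ ∃ c ∈ cs, pvL0 c = v ∨ pvL1 c = v
def SHasNeg (cs : List (List Int)) (v : Int) : Prop := 0 < v ∧ ∃ c ∈ cs, pvL0 c = -v ∨ pvL1 c = -v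
def SSing (cs : List (List Int)) (v : Int) : Prop :=
  (SHasPos cs v ∧ ¬ SHasNeg cs v) ∨ (SHasNeg cs v ∧ ¬ SHasPos cs v)
def SOk (cs : List (List Int)) : Prop := ∀ v, ¬ SSing cs v
def SDmd (cs : List (List Int)) (c : List Int) : Prop := SSing cs |pvL0 c| ∨ SSing cs |pvL1 c|

theorem mem_pvPosOf (cs : List (List Int)) (v : Int) : v ∈ pvPosOf cs ↔ SHasPos cs v := by
  simp only [pvPosOf, PySem.Set.mem_union, PySem.Set.mem_ofList, List.mem_map, List.mem_filter,
    decide_eq_true_eq, SHasPos]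
  constructor
  · rintro (⟨c, ⟨hc, hpos⟩, rfl⟩ | ⟨c, ⟨hc, hpos⟩, rfl⟩)
    exacts [⟨hpos, c, hc, Or.inl rfl⟩, ⟨hpos, c, hc, Or.inr rfl⟩]
  · rintro ⟨hv, c, hc, (h0 | h1)⟩
    exacts [Or.inl ⟨c, ⟨hc, h0 ▸ hv⟩, h0⟩, Or.inr ⟨c, ⟨hc, h1 ▸ hv⟩, h1⟩]

theorem mem_pvNegOf (cs : List (List Int)) (v : Int) : v ∈ pvNegOf cs ↔ SHasNeg cs v := by
  simp only [pvNegOf, PySem.Set.mem_union, PySem.Set.mem_ofList, List.mem_map, List.mem_filter,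
    decide_eq_true_eq, SHasNeg]
  constructor
  · rintro (⟨c, ⟨hc, hneg⟩, rfl⟩ | ⟨c, ⟨hc, hneg⟩, rfl⟩)
    · exact ⟨by omega, c, hc, Or.inl (by omega)⟩
    · exact ⟨by omega, c, hc, Or.inr (by omega)⟩
  · rintro ⟨hv, c, hc, (h0 | h1)⟩
    · exact Or.inl ⟨c, ⟨hc, by omega⟩, by omega⟩
    · exact Or.inr ⟨c, ⟨hc, by omega⟩, by omega⟩

theorem mem_pvDiffOf (cs : List (List Int)) (v : Int) : v ∈ pvDiffOf cs ↔ SSing cs v := by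
  simp only [pvDiffOf, PySem.Set.mem_symmDiff, mem_pvPosOf, mem_pvNegOf, SSing]

theorem pvPolFold_getD (L : List Int) (v : Int) :
    (pvPolFold L).getD v (false, false) =
      (L.any (fun l => decide (|l| = v) && decide (0 < l)),
       L.any (fun l => decide (|l| = v) && decide (l < 0))) := by
  induction L using List.reverseRecOn with
  | nil => simp [pvPolFold]
  | append_singleton L l ih =>
    rw [pvPolFold, List.foldl_append, List.foldl_cons, List.foldl_nil, ← pvPolFold]
    rw [PySem.Dict.getD_insert]
    by_cases hv : v = |l|
    · subst hv
      rw [if_pos rfl, ih]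
      simp [List.any_append]
    · rw [if_neg hv, ih]
      have hne : ¬ |l| = v := fun h => hv h.symm
      simp [List.any_append, hne]

theorem pvPolFold_nodup (L : List Int) : (pvPolFold L).keys.Nodup := by
  rw [pvPolFold_keys]; exact PySem.Set.nodup_ofList _

theorem anyPos_iff (cs : List (List Int)) (v : Int) :
    ((pvLits cs).any (fun l => decide (|l| = v) && decide (0 < l)) = true) ↔ SHasPos cs v := by
  rw [List.any_eq_true]
  constructor
  · rintro ⟨l, hl, hp⟩
    simp only [Bool.and_eq_true, decide_eq_true_eq] at hp
    obtain ⟨habs, hpos⟩ := hp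
    have hv : l = v := by rw [← habs]; exact (abs_of_pos hpos).symm
    subst hv
    simp only [pvLits, List.mem_filter, List.mem_flatMap, List.mem_cons, decide_eq_true_eq] at hl
    obtain ⟨⟨c, hc, hlit⟩, _⟩ := hl
    refine ⟨hpos, c, hc, ?_⟩
    rcases hlit with h0 | h1 | hF
    · exact Or.inl h0.symm
    · exact Or.inr h1.symm
    · exact absurd hF (List.not_mem_nil)
  · rintro ⟨hv, c, hc, hlit⟩
    refine ⟨v, ?_, by simp [abs_of_pos hv, hv]⟩
    simp only [pvLits, List.mem_filter, List.mem_flatMap, List.mem_cons, decide_eq_true_eq]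
    refine ⟨⟨c, hc, ?_⟩, by omega⟩
    rcases hlit with h0 | h1
    · exact Or.inl h0.symm
    · exact Or.inr (Or.inl h1.symm)

theorem anyNeg_iff (cs : List (List Int)) (v : Int) :
    ((pvLits cs).any (fun l => decide (|l| = v) && decide (l < 0)) = true) ↔ SHasNeg cs v := by
  rw [List.any_eq_true]
  constructor
  · rintro ⟨l, hl, hp⟩
    simp only [Bool.and_eq_true, decide_eq_true_eq] at hp
    obtain ⟨habs, hneg⟩ := hp
    have habs' : |l| = -l := abs_of_neg hneg
    have hv : l = -v := by omega
    subst hv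
    simp only [pvLits, List.mem_filter, List.mem_flatMap, List.mem_cons, decide_eq_true_eq] at hl
    obtain ⟨⟨c, hc, hlit⟩, _⟩ := hl
    refine ⟨by omega, c, hc, ?_⟩
    rcases hlit with h0 | h1 | hF
    · exact Or.inl h0.symm
    · exact Or.inr h1.symm
    · exact absurd hF (List.not_mem_nil)
  · rintro ⟨hv, c, hc, hlit⟩
    refine ⟨-v, ?_, by simp; constructor <;> omega⟩
    simp only [pvLits, List.mem_filter, List.mem_flatMap, List.mem_cons, decide_eq_true_eq]
    refine ⟨⟨c, hc, ?_⟩, by omega⟩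
    rcases hlit with h0 | h1
    · exact Or.inl h0.symm
    · exact Or.inr (Or.inl h1.symm)

theorem keyOcc_iff (cs : List (List Int)) (v : Int) :
    (∃ l ∈ pvLits cs, |l| = v) ↔ (SHasPos cs v ∨ SHasNeg cs v) := by
  constructor
  · rintro ⟨l, hl, habs⟩
    simp only [pvLits, List.mem_filter, List.mem_flatMap, List.mem_cons, decide_eq_true_eq] at hl
    obtain ⟨⟨c, hc, hlit⟩, hl0⟩ := hl
    have hlit' : pvL0 c = l ∨ pvL1 c = l := by
      rcases hlit with h0 | h1 | hF
      · exact Or.inl h0.symm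
      · exact Or.inr h1.symm
      · exact absurd hF (List.not_mem_nil)
    rcases lt_or_gt_of_ne hl0 with hneg | hpos
    · have : |l| = -l := abs_of_neg hneg
      exact Or.inr ⟨by omega, c, hc, by rcases hlit' with h | h <;> [left; right] <;> omega⟩
    · have : |l| = l := abs_of_pos hpos
      exact Or.inl ⟨by omega, c, hc, by rcases hlit' with h | h <;> [left; right] <;> omega⟩
  · rintro (⟨hv, c, hc, hlit⟩ | ⟨hv, c, hc, hlit⟩)
    · refine ⟨v, ?_, abs_of_pos hv⟩
      simp only [pvLits, List.mem_filter, List.mem_flatMap, List.mem_cons, decide_eq_true_eq]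
      exact ⟨⟨c, hc, by rcases hlit with h | h <;> [left; right] <;> omega⟩, by omega⟩
    · refine ⟨-v, ?_, by rw [abs_neg, abs_of_pos hv]⟩
      simp only [pvLits, List.mem_filter, List.mem_flatMap, List.mem_cons, decide_eq_true_eq]
      exact ⟨⟨c, hc, by rcases hlit with h | h <;> [left; right] <;> omega⟩, by omega⟩

theorem mem_pvBadOf (cs : List (List Int)) (v : Int) : v ∈ pvBadOf cs ↔ SSing cs v := by
  have hnd : (pvPolOf cs).keys.Nodup := pvPolFold_nodup _
  have hkeys : ∀ w, w ∈ (pvPolOf cs).keys ↔ (SHasPos cs w ∨ SHasNeg cs w) := by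
    intro w
    rw [pvPolOf, pvPolFold_keys, PySem.Set.mem_ofList, List.mem_map, ← keyOcc_iff]
  have hgetD : ∀ w, (pvPolOf cs).getD w (false, false) =
      ((pvLits cs).any (fun l => decide (|l| = w) && decide (0 < l)),
       (pvLits cs).any (fun l => decide (|l| = w) && decide (l < 0))) := fun w => pvPolFold_getD _ w
  rw [pvBadOf, PySem.Set.mem_ofList, List.mem_map]
  constructor
  · rintro ⟨p, hp, rfl⟩
    rw [List.mem_filter] at hp
    obtain ⟨hpi, hpred⟩ := hp
    have hk : p.1 ∈ (pvPolOf cs).keys := PySem.Dict.mem_keys_of_mem_items _ hpi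
    have hval : (pvPolOf cs).getD p.1 (false, false) = p.2 := by
      have : (p.1, p.2) ∈ (pvPolOf cs).items := hpi
      exact PySem.Dict.getD_of_mem_items _ this hnd (false, false)
    rw [hgetD p.1] at hval
    rw [bne_iff_ne] at hpred
    have hPN := (hkeys p.1).mp hk
    have e1 := anyPos_iff cs p.1
    have e2 := anyNeg_iff cs p.1
    rw [SSing]
    obtain ⟨ha, hb⟩ : p.2.1 = ((pvLits cs).any (fun l => decide (|l| = p.1) && decide (0 < l))) ∧
        p.2.2 = ((pvLits cs).any (fun l => decide (|l| = p.1) && decide (l < 0))) := by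
      rw [← hval]; exact ⟨rfl, rfl⟩
    rw [ha, hb] at hpred
    by_cases hP : SHasPos cs p.1 <;> by_cases hN : SHasNeg cs p.1
    · exact absurd (by rw [e1.mpr hP, e2.mpr hN]) hpred
    · exact Or.inl ⟨hP, hN⟩
    · exact Or.inr ⟨hN, hP⟩
    · exact absurd hPN (by tauto)
  · intro hs
    have hPN : SHasPos cs v ∨ SHasNeg cs v := by rcases hs with ⟨h, _⟩ | ⟨h, _⟩ <;> tauto
    have hk : v ∈ (pvPolOf cs).keys := (hkeys v).mpr hPN
    refine ⟨(v, (pvPolOf cs).getD v (false, false)), ?_, rfl⟩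
    rw [List.mem_filter]
    constructor
    · rw [PySem.Dict.items_eq_map_keys _ hnd (false, false), List.mem_map]
      exact ⟨v, hk, rfl⟩
    · rw [hgetD v]
      have e1 := anyPos_iff cs v
      have e2 := anyNeg_iff cs v
      simp only [bne_iff_ne, ne_eq]
      rcases hs with ⟨hP, hN⟩ | ⟨hN, hP⟩
      · cases hb : (pvLits cs).any (fun l => decide (|l| = v) && decide (l < 0)) with
        | true => exact absurd (e2.mp hb) hN
        | false => rw [e1.mpr hP]; simp
      · cases hb : (pvLits cs).any (fun l => decide (|l| = v) && decide (0 < l)) with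
        | true => exact absurd (e1.mp hb) hP
        | false => rw [e2.mpr hN]; simp

theorem pvDoomedA_iff (cs : List (List Int)) (c : List Int) :
    pvDoomedA (pvDiffOf cs) c = true ↔ SDmd cs c := by
  simp [pvDoomedA, SDmd, Bool.or_eq_true, mem_pvDiffOf]

theorem pvKeep_iff (cs : List (List Int)) (c : List Int) :
    pvKeep (pvBadOf cs) c = true ↔ ¬ SDmd cs c := by
  simp only [pvKeep, SDmd, Bool.and_eq_true, Bool.not_eq_true', ← Bool.not_eq_true,
    PySem.Set.contains_iff, mem_pvBadOf, not_or]

-- the crucial preservation fact: members of an ok sublist are never doomed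
theorem not_SDmd_of_ok (S T : List (List Int)) (hok : SOk S) (hsub : List.Sublist S T)
    (c : List Int) (hc : c ∈ S) : ¬ SDmd T c := by
  have hmonoP : ∀ w, SHasPos S w → SHasPos T w := by
    rintro w ⟨h1, c', hc', h2⟩; exact ⟨h1, c', hsub.subset hc', h2⟩
  have hmonoN : ∀ w, SHasNeg S w → SHasNeg T w := by
    rintro w ⟨h1, c', hc', h2⟩; exact ⟨h1, c', hsub.subset hc', h2⟩
  have H : ∀ l : Int, (pvL0 c = l ∨ pvL1 c = l) → ¬ SSing T |l| := by
    intro l hl hs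
    have hv : 0 < |l| := by rcases hs with ⟨⟨h, _⟩, _⟩ | ⟨⟨h, _⟩, _⟩ <;> exact h
    have hPN : SHasPos S |l| ∨ SHasNeg S |l| := by
      rcases lt_trichotomy l 0 with hneg | hzero | hpos
      · exact Or.inr ⟨hv, c, hc, by rcases hl with h | h <;> [left; right] <;>
          rw [h] <;> rw [abs_of_neg hneg] <;> omega⟩
      · subst hzero; simp at hv
      · exact Or.inl ⟨hv, c, hc, by rcases hl with h | h <;> [left; right] <;>
          rw [h] <;> rw [abs_of_pos hpos]⟩
    have hboth : SHasPos S |l| ∧ SHasNeg S |l| := by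
      have := hok |l|; rw [SSing] at this; tauto
    rcases hs with ⟨_, hno⟩ | ⟨_, hno⟩
    · exact hno (hmonoN _ hboth.2)
    · exact hno (hmonoP _ hboth.1)
  rintro (h0 | h1)
  · exact H (pvL0 c) (Or.inl rfl) h0
  · exact H (pvL1 c) (Or.inr rfl) h1

theorem pvPassA_sublist (diff : PySem.Set Int) (cs : List (List Int)) : List.Sublist (pvPassA diff cs) cs := by
  induction cs using pvPassA.induct diff with
  | case1 => simp [pvPassA_nil]
  | case2 c hd => rw [pvPassA_cons]; simp [hd]
  | case3 c hd d rest' ih => rw [pvPassA_cons]; simp only [hd, if_pos]; exact (ih.cons₂ _).cons _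
  | case4 c rest hd ih => rw [pvPassA_cons]; simp only [hd, if_neg, Bool.not_eq_true]; exact ih.cons₂ _

theorem sublist_pvPassA (diff : PySem.Set Int) (S cs : List (List Int))
    (hS : ∀ c ∈ S, pvDoomedA diff c = false) (hsub : List.Sublist S cs) : List.Sublist S (pvPassA diff cs) := by
  induction cs using pvPassA.induct diff generalizing S with
  | case1 => rw [pvPassA_nil]; exact hsub
  | case2 c hd =>
    rw [pvPassA_cons]; simp only [hd, if_pos]
    rcases List.sublist_cons_iff.mp hsub with h | ⟨r, rfl, hr⟩
    · simpa using h
    · exact absurd (hS c (List.mem_cons_self)) (by simp [hd])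
  | case3 c hd d rest' ih =>
    rw [pvPassA_cons]; simp only [hd, if_pos]
    rcases List.sublist_cons_iff.mp hsub with h | ⟨r, rfl, hr⟩
    · rcases List.sublist_cons_iff.mp h with h' | ⟨r, rfl, hr'⟩
      · exact (ih S hS h').cons _
      · exact (ih r (fun x hx => hS x (List.mem_cons_of_mem _ hx)) hr').cons₂ _
    · exact absurd (hS c (List.mem_cons_self)) (by simp [hd])
  | case4 c rest hd ih =>
    rw [pvPassA_cons]; simp only [hd, if_neg, Bool.not_eq_true]
    rcases List.sublist_cons_iff.mp hsub with h | ⟨r, rfl, hr⟩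
    · exact (ih S hS h).cons _
    · exact (ih r (fun x hx => hS x (List.mem_cons_of_mem _ hx)) hr).cons₂ _

theorem pvLoopA_eq (cs : List (List Int)) : pvLoopA cs =
    if PySem.Set.len (pvDiffOf cs) = 0 then cs else pvLoopA (pvPassA (pvDiffOf cs) cs) := by
  conv_lhs => rw [pvLoopA]

theorem pvLoopB_eq (cs : List (List Int)) : pvLoopB cs =
    if pvBadOf cs = [] then cs else pvLoopB (cs.filter (pvKeep (pvBadOf cs))) := by
  conv_lhs => rw [pvLoopB]

theorem pvLoopA_sublist (cs : List (List Int)) : List.Sublist (pvLoopA cs) cs := by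
  induction cs using pvLoopA.induct with
  | case1 cs h => rw [pvLoopA_eq, if_pos h]
  | case2 cs h ih => rw [pvLoopA_eq, if_neg h]; exact ih.trans (pvPassA_sublist _ _)

theorem pvBadOf_nil : pvBadOf [] = [] := by rfl

theorem pvLoopB_ind (motive : List (List Int) → Prop)
    (base : ∀ cs, pvBadOf cs = [] → motive cs)
    (step : ∀ cs, pvBadOf cs ≠ [] → motive (cs.filter (pvKeep (pvBadOf cs))) → motive cs) :
    ∀ cs, motive cs := by
  have key : ∀ n (cs : List (List Int)), cs.length ≤ n → motive cs := by
    intro n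
    induction n with
    | zero =>
      intro cs hl
      have : cs = [] := List.length_eq_zero_iff.mp (Nat.le_zero.mp hl)
      subst this
      exact base [] pvBadOf_nil
    | succ n ih =>
      intro cs hl
      by_cases h : pvBadOf cs = []
      · exact base cs h
      · refine step cs h (ih _ ?_)
        obtain ⟨c, hc, hk⟩ := pvBadOf_nonempty_exists cs h
        have : (List.filter (pvKeep (pvBadOf cs)) cs).length < cs.length :=
          List.length_filter_lt_length_iff_exists.mpr ⟨c, hc, by simpa using hk⟩
        omega
  exact fun cs => key cs.length cs le_rfl

theorem pvLoopB_sublist (cs : List (List Int)) : List.Sublist (pvLoopB cs) cs := by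
  induction cs using pvLoopB_ind with
  | base cs h => rw [pvLoopB_eq, if_pos h]
  | step cs h ih => rw [pvLoopB_eq, if_neg h]; exact ih.trans List.filter_sublist

theorem SOk_pvLoopA (cs : List (List Int)) : SOk (pvLoopA cs) := by
  induction cs using pvLoopA.induct with
  | case1 cs h =>
    rw [pvLoopA_eq, if_pos h]
    have hnil : pvDiffOf cs = [] := List.length_eq_zero_iff.mp (by simpa [PySem.Set.len] using h)
    intro v hs
    have := (mem_pvDiffOf cs v).mpr hs
    rw [hnil] at this
    exact absurd this (List.not_mem_nil)
  | case2 cs h ih => rw [pvLoopA_eq, if_neg h]; exact ih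

theorem SOk_pvLoopB (cs : List (List Int)) : SOk (pvLoopB cs) := by
  induction cs using pvLoopB_ind with
  | base cs h =>
    rw [pvLoopB_eq, if_pos h]
    intro v hs
    have := (mem_pvBadOf cs v).mpr hs
    rw [h] at this
    exact absurd this (List.not_mem_nil)
  | step cs h ih => rw [pvLoopB_eq, if_neg h]; exact ih

theorem sublist_pvLoopA (S cs : List (List Int)) (hok : SOk S) (hsub : List.Sublist S cs) : List.Sublist S (pvLoopA cs) := by
  revert hsub
  induction cs using pvLoopA.induct with
  | case1 cs h => intro hsub; rw [pvLoopA_eq, if_pos h]; exact hsub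
  | case2 cs h ih =>
    intro hsub
    rw [pvLoopA_eq, if_neg h]
    apply ih
    apply sublist_pvPassA _ _ _ _ hsub
    intro c hc
    have := not_SDmd_of_ok S cs hok hsub c hc
    have h2 := (pvDoomedA_iff cs c).not.mpr this
    exact Bool.not_eq_true _ ▸ h2

theorem sublist_pvLoopB (S cs : List (List Int)) (hok : SOk S) (hsub : List.Sublist S cs) : List.Sublist S (pvLoopB cs) := by
  revert hsub
  induction cs using pvLoopB_ind with
  | base cs h => intro hsub; rw [pvLoopB_eq, if_pos h]; exact hsub
  | step cs h ih =>
    intro hsub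
    rw [pvLoopB_eq, if_neg h]
    apply ih
    have hself : S.filter (pvKeep (pvBadOf cs)) = S := by
      apply List.filter_eq_self.mpr
      intro c hc
      exact (pvKeep_iff cs c).mpr (not_SDmd_of_ok S cs hok hsub c hc)
    exact hself ▸ hsub.filter _

-- ===== VERDICT (by name: the statement is the Claim_ definition above) =====
theorem reduce_size_spec : Claim_equal_reduce_size := by
  intro clauses _ _
  unfold Spec_reduce_size reduce_size reduce_size_alt
  exact List.Sublist.antisymm
    (sublist_pvLoopB (pvLoopA clauses) clauses (SOk_pvLoopA clauses) (pvLoopA_sublist clauses))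
    (sublist_pvLoopA (pvLoopB clauses) clauses (SOk_pvLoopB clauses) (pvLoopB_sublist clauses))
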